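-- pv_equiv track=rewrite | github.com/AliFazelniya/Neicharan-s-Dooz-with-Minimax-algorithm | Neicharan's Dooz - Main.py | user_counter
-- ===== SOURCE A (Python) =====
-- def user_counter(arr):
--     # Var to store all points in a line.
--     user_points = 0
--     # Var to calculate all cells that are X in a line.
--     user_points_counter = 0
--     # Checking all cells in line.
--     for i in arr:
--         # Check if the cell is X or not:
--         if i == "X":
--             # If X then user_points_counter + 1
--             user_points_counter += 1
--         else:
--             # If not check if user_points_counter >= 3. It means that there and 3 or more X cell in a row.
--             if user_points_counter >= 3:
--                 # If there and 3 or more X cell in a row then store points in user_points.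
--                 user_points += user_points_counter
--             # user_points_counter = 0 to calculate points for next cells.
--             user_points_counter = 0
--     # Store points if all cells in line are X (abardooz).
--     if user_points_counter >= 3:
--         user_points += user_points_counter
--     return user_points
-- ===== SOURCE B (Python) =====
-- def _runs(arr):
--     # Maximal consecutive runs of equal elements, as [element, count] pairs.
--     runs = []
--     for x in arr:
--         if runs and runs[-1][0] == x:
--             runs[-1][1] += 1
--         else:
--             runs.append([x, 1])
--     return runs
--
-- def user_counter(arr):
--     # Group-then-score: sum the lengths of the "X"-runs of length >= 3.
--     total = 0
--     for key, count in _runs(arr):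
--         if key == "X" and count >= 3:
--             total += count
--     return total
-- ===== Notes on version B (the rewrite author's own statement) =====
-- stated objective: idiomatic
-- what changed: B first splits the line into maximal runs of equal cells and then sums the qualifying X-run lengths, replacing A's stateful scan with its accumulator and after-loop boundary check.
import Mathlib
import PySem

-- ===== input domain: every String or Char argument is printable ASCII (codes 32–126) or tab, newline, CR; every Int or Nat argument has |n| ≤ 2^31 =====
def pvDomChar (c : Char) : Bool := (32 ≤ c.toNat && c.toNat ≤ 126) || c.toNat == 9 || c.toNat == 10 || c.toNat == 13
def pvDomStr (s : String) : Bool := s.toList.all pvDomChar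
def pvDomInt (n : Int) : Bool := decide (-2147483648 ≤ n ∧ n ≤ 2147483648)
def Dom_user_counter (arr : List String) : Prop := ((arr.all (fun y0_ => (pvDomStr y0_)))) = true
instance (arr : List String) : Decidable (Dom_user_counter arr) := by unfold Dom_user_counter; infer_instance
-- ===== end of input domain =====

-- B splits the line into maximal runs of equal cells and then scores them, instead of A's
-- stateful scan with an accumulator and an after-loop boundary check; same O(n) cost.

-- ===== PORT A =====
-- stateful scan: state (user_points, user_points_counter), then the after-loop check
def user_counter (arr : List String) : Int :=
  let s := arr.foldl (fun (st : Int × Int) i =>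
    if i = "X" then (st.1, st.2 + 1)
    else (if st.2 ≥ 3 then st.1 + st.2 else st.1, 0)) (0, 0)
  if s.2 ≥ 3 then s.1 + s.2 else s.1

-- ===== PORT B =====
-- one step of _runs: extend the last run if it has the same element, else open a new run
def runsStep (runs : List (String × Int)) (x : String) : List (String × Int) :=
  match runs.getLast? with
  | some p => if p.1 = x then runs.dropLast ++ [(p.1, p.2 + 1)] else runs ++ [(x, 1)]
  | none => runs ++ [(x, 1)]

-- _runs: maximal consecutive runs of equal elements with their counts
def runsOf (arr : List String) : List (String × Int) := arr.foldl runsStep []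

def user_counter_alt (arr : List String) : Int :=
  (runsOf arr).foldl (fun total kc => if kc.1 = "X" ∧ kc.2 ≥ 3 then total + kc.2 else total) 0

-- ===== PRECONDITION & SPEC =====
def Spec_user_counter (arr : List String) (out : Int) : Prop := out = user_counter_alt arr
instance (arr : List String) (out : Int) : Decidable (Spec_user_counter arr out) := by unfold Spec_user_counter; infer_instance

-- ===== CLAIM (what is proved, stated in full; the proofs are below) =====
def Claim_equal_user_counter : Prop := ∀ (arr : List String), Dom_user_counter arr → Spec_user_counter arr (user_counter arr)

-- ===== LEMMAS AND PROOFS =====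

-- A's loop, unfolded as a recursion over the remaining list
def auxA (p c : Int) : List String → Int
  | [] => if c ≥ 3 then p + c else p
  | i :: rest => if i = "X" then auxA p (c + 1) rest else auxA (if c ≥ 3 then p + c else p) 0 rest

theorem foldl_auxA : ∀ (l : List String) (p c : Int),
    (let s := l.foldl (fun (st : Int × Int) i =>
        if i = "X" then (st.1, st.2 + 1)
        else (if st.2 ≥ 3 then st.1 + st.2 else st.1, 0)) (p, c)
     if s.2 ≥ 3 then s.1 + s.2 else s.1) = auxA p c l := by
  intro l
  induction l with
  | nil => intro p c; simp [auxA]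
  | cons i rest ih =>
    intro p c
    by_cases h : i = "X" <;> simp [auxA, h, ih]

theorem auxA_shift : ∀ (l : List String) (p c : Int), auxA p c l = p + auxA 0 c l := by
  intro l
  induction l with
  | nil => intro p c; simp [auxA]; split_ifs <;> omega
  | cons i rest ih =>
    intro p c
    by_cases h : i = "X"
    · simp [auxA, h]; rw [ih, ih 0]
    · simp [auxA, h]
      rw [ih, ih (if 3 ≤ c then c else 0)]
      split_ifs <;> ring

-- B's run list from an open run (k, c), written head-recursively
def gAux (k : String) (c : Int) : List String → List (String × Int)
  | [] => [(k, c)]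
  | y :: ys => if y = k then gAux k (c + 1) ys else (k, c) :: gAux y 1 ys

theorem foldl_runsStep_gAux : ∀ (l : List String) (rs : List (String × Int)) (k : String) (c : Int),
    l.foldl runsStep (rs ++ [(k, c)]) = rs ++ gAux k c l := by
  intro l
  induction l with
  | nil => intro rs k c; simp [gAux]
  | cons y ys ih =>
    intro rs k c
    by_cases h : y = k
    · subst h
      have : runsStep (rs ++ [(y, c)]) y = rs ++ [(y, c + 1)] := by
        simp [runsStep]
      simp [List.foldl_cons, this, ih, gAux]
    · have hne : ¬ (k = y) := fun e => h e.symm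
      have : runsStep (rs ++ [(k, c)]) y = (rs ++ [(k, c)]) ++ [(y, 1)] := by
        simp [runsStep, hne]
      simp only [List.foldl_cons, this, ih, gAux, if_neg h]
      simp

-- scoring B's run list equals running A's scan with the matching open counter
theorem score_gAux : ∀ (l : List String) (k : String) (c acc : Int),
    (gAux k c l).foldl (fun total kc => if kc.1 = "X" ∧ kc.2 ≥ 3 then total + kc.2 else total) acc
      = acc + auxA 0 (if k = "X" then c else 0) l := by
  intro l
  induction l with
  | nil =>
    intro k c acc
    simp [gAux, auxA]
    by_cases hk : k = "X" <;> simp [hk]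
    split_ifs <;> omega
  | cons y ys ih =>
    intro k c acc
    by_cases h : y = k
    · subst h
      rw [show gAux y c (y :: ys) = gAux y (c + 1) ys by simp [gAux]]
      rw [ih]
      by_cases hy : y = "X"
      · simp [hy, auxA]
      · simp [hy, auxA]
    · rw [show gAux k c (y :: ys) = (k, c) :: gAux y 1 ys by simp [gAux, h]]
      rw [List.foldl_cons, ih]
      by_cases hy : y = "X"
      · have hk : k ≠ "X" := fun e => h (hy.trans e.symm)
        simp [hy, hk, auxA]
      · rw [show auxA 0 (if k = "X" then c else 0) (y :: ys)
            = auxA (if (if k = "X" then c else 0) ≥ 3 then (if k = "X" then c else 0) else 0) 0 ys by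
          simp [auxA, hy]]
        rw [show (if y = "X" then (1:Int) else 0) = 0 by simp [hy]]
        conv_rhs => rw [auxA_shift ys]
        split_ifs <;> simp_all
        ring

-- ===== VERDICT (by name: the statement is the Claim_ definition above) =====
theorem user_counter_spec : Claim_equal_user_counter := by
  intro arr _
  unfold Spec_user_counter user_counter user_counter_alt runsOf
  rw [foldl_auxA]
  match arr with
  | [] => simp [auxA]
  | x :: rest =>
    rw [show auxA 0 0 (x :: rest)
        = auxA 0 (if x = "X" then 1 else 0) rest by by_cases hx : x = "X" <;> simp [auxA, hx]]
    rw [show (x :: rest).foldl runsStep [] = ([] : List (String × Int)) ++ gAux x 1 rest by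
      rw [List.foldl_cons, show runsStep [] x = [] ++ [(x, 1)] by simp [runsStep]]
      exact foldl_runsStep_gAux rest [] x 1]
    rw [List.nil_append, score_gAux rest x 1 0, zero_add]
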